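-- pv_equiv track=rewrite | github.com/daalgi/algorithms | strings/most_common_word.py | one_pass
-- ===== SOURCE A (Python) =====
-- from typing import List
--
-- def one_pass(paragraph: str, banned: List[str]) -> str:
--     # Time complexity: O(m+n)
--     # Space complexity: O(m)
--
--     banned = set(banned)
--     signs = set([" ", "!", "?", "'", ",", ";", ":", "."])
--     i, n = 0, len(paragraph)
--     curr = []
--     count = {}
--     max_freq, most_common = 0, ""
--     while i < n:
--
--         # Skip signs
--         while i < n and paragraph[i] in signs:
--             i += 1
--
--         # Get next word
--         while i < n and paragraph[i] not in signs:
--             curr.append(paragraph[i].lower())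
--             i += 1
--
--         if not curr:
--             continue
--
--         word = "".join(curr)
--         curr = []
--
--         # Skip banned words
--         if word in banned:
--             continue
--
--         # Update count
--         count[word] = count.get(word, 0) + 1
--         if count[word] > max_freq:
--             max_freq = count[word]
--             most_common = word
--
--     return most_common
-- ===== SOURCE B (Python) =====
-- from typing import List
--
-- def one_pass(paragraph: str, banned: List[str]) -> str:
--     # Different algorithm: instead of tracking a running max while counting,
--     # (1) normalize via translate (punctuation -> space) + split, (2) count all
--     # words to find the global maximum frequency m, (3) rescan and return the
--     # FIRST word whose running count reaches m (= A's tie-break), early exit.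
--     banned_set = set(banned)
--     table = str.maketrans("!?',;:.", " " * 7)
--     words = [w for w in paragraph.lower().translate(table).split(" ")
--              if w and w not in banned_set]
--     counts = {}
--     for w in words:
--         counts[w] = counts.get(w, 0) + 1
--     m = max(counts.values(), default=0)
--     seen = {}
--     for w in words:
--         c = seen.get(w, 0) + 1
--         if c == m:
--             return w
--         seen[w] = c
--     return ""
-- ===== Notes on version B (the rewrite author's own statement) =====
-- stated objective: faster
-- what changed: A does one stateful char-level Python scan interleaving tokenizing, counting and a running max; B uses a different algorithm: translate punctuation to spaces and split the lowered paragraph (C-level str methods), count all words to obtain the global maximum frequency, then rescan the word list returning with early exit the first word whose running count reaches that maximum (which reproduces A's first-to-reach-the-max tie-break).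
import Mathlib
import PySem

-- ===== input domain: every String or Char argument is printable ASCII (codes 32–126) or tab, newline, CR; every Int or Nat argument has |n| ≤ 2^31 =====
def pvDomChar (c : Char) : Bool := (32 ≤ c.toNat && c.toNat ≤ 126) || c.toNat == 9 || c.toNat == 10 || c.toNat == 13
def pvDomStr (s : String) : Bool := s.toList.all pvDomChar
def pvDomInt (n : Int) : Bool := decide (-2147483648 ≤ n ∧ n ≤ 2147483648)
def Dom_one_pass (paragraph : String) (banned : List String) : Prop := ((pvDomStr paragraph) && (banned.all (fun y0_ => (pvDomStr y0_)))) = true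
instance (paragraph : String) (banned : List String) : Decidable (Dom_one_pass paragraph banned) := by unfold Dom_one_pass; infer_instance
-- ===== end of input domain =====

-- B replaces A's single stateful scan (char-level tokenizing interleaved with counting and
-- a running max) by a different algorithm: translate punctuation to spaces and split, count
-- all words to find the global maximum frequency, then rescan and return the FIRST word
-- whose running count reaches that maximum (A's tie-break), with early exit; the timing
-- run measured B faster by a constant factor.

-- ===== PORT A =====
-- signs = set([" ", "!", "?", "'", ",", ";", ":", "."])
def pvSigns : List Char := [' ', '!', '?', '\'', ',', ';', ':', '.']
def pvIsSign (c : Char) : Bool := pvSigns.contains c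

-- termination helper for the loops (the index strictly increases once a word starts)
theorem pvDropWhileLt (p : Char → Bool) (l : List Char) (h : l.takeWhile p ≠ []) :
    (l.dropWhile p).length < l.length := by
  cases l with
  | nil => simp at h
  | cons a l =>
    by_cases hp : p a
    · rw [List.dropWhile_cons_of_pos hp]
      exact Nat.lt_succ_of_le (List.length_dropWhile_le p l)
    · rw [List.takeWhile_cons_of_neg hp] at h
      exact absurd rfl h

-- the outer 'while i < n' loop; the two inner while loops are the dropWhile (skip signs)
-- and takeWhile/dropWhile (collect the next word, lowercasing its chars)
def one_pass_loop (banned : PySem.Set String) (count : PySem.Dict String Int)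
    (maxFreq : Int) (mostCommon : String) : List Char → String
  | [] => mostCommon
  | c :: cs =>
    let rest1 := List.dropWhile pvIsSign (c :: cs)
    let curr := (List.takeWhile (fun x => !pvIsSign x) rest1).map PySem.Chars.lowerChar
    let rest2 := List.dropWhile (fun x => !pvIsSign x) rest1
    if curr.isEmpty then mostCommon  -- 'continue' with i = n: the loop then exits
    else
      let word := String.ofList curr
      if banned.contains word then one_pass_loop banned count maxFreq mostCommon rest2
      else
        let count' := count.insert word (count.getD word 0 + 1)
        if count'.getD word 0 > maxFreq then
          one_pass_loop banned count' (count'.getD word 0) word rest2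
        else one_pass_loop banned count' maxFreq mostCommon rest2
termination_by cs => cs.length
decreasing_by
  all_goals
    have hcur : ¬ (List.map PySem.Chars.lowerChar (List.takeWhile (fun x => !pvIsSign x) (List.dropWhile pvIsSign (c :: cs)))).isEmpty = true := by assumption
    have hne : List.takeWhile (fun x => !pvIsSign x) (List.dropWhile pvIsSign (c :: cs)) ≠ [] := by
      intro hnil; rw [hnil] at hcur; simp at hcur
    exact lt_of_lt_of_le (pvDropWhileLt _ _ hne) (List.length_dropWhile_le _ _)

def one_pass (paragraph : String) (banned : List String) : String :=
  one_pass_loop (PySem.Set.ofList banned) PySem.Dict.empty 0 "" paragraph.toList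

-- ===== PORT B =====
-- table = str.maketrans("!?',;:.", " " * 7)
def pvPunct : List Char := ['!', '?', '\'', ',', ';', ':', '.']
def pvTrans (c : Char) : Char := if pvPunct.contains c then ' ' else c

-- the rescan with early exit: first word whose running count reaches m
def pvScanFirst (m : Int) : PySem.Dict String Int → List String → String
  | _, [] => ""
  | seen, w :: ws =>
    let c := seen.getD w 0 + 1
    if c = m then w else pvScanFirst m (seen.insert w c) ws

def one_pass_alt (paragraph : String) (banned : List String) : String :=
  let bset := PySem.Set.ofList banned
  let words := ((PySem.Chars.splitOn ((PySem.Str.lower paragraph).toList.map pvTrans) [' ']).map String.ofList).filter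
      (fun w => !(w == "") && !bset.contains w)
  let counts := words.foldl (fun (d : PySem.Dict String Int) w => d.insert w (d.getD w 0 + 1)) PySem.Dict.empty
  let m := PySem.List.maxD counts.values (fun x => x) 0
  pvScanFirst m PySem.Dict.empty words

-- ===== PRECONDITION & SPEC =====
def Spec_one_pass (paragraph : String) (banned : List String) (out : String) : Prop := out = one_pass_alt paragraph banned
instance (paragraph : String) (banned : List String) (out : String) : Decidable (Spec_one_pass paragraph banned out) := by unfold Spec_one_pass; infer_instance

-- ===== CLAIM (what is proved, stated in full; the proofs are below) =====
def Claim_equal_one_pass : Prop := ∀ (paragraph : String) (banned : List String), Dom_one_pass paragraph banned → Spec_one_pass paragraph banned (one_pass paragraph banned)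

-- ===== LEMMAS AND PROOFS =====

-- tokenizer w.r.t. a separator predicate (A's skip/collect recursion)
def pvToksBy (p : Char → Bool) : List Char → List (List Char)
  | [] => []
  | c :: cs =>
    if p c then pvToksBy p cs
    else (List.takeWhile (fun x => !p x) (c :: cs))
      :: pvToksBy p (List.dropWhile (fun x => !p x) (c :: cs))
termination_by cs => cs.length
decreasing_by
  · simp
  · exact pvDropWhileLt _ _ (by rw [List.takeWhile_cons_of_pos (by simp [*])]; simp)

-- the single-char split (model of PySem.Chars.splitOn with sep [' '])
def pvSplit1 (cur : List Char) : List Char → List (List Char)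
  | [] => [cur]
  | a :: l => if a = ' ' then cur :: pvSplit1 [] l else pvSplit1 (cur ++ [a]) l

-- A's counting loop after the ban filter
def pvCountF : PySem.Dict String Int → Int → String → List String → String
  | _, _, mc, [] => mc
  | count, mf, mc, w :: ws =>
    if count.getD w 0 + 1 > mf then
      pvCountF (count.insert w (count.getD w 0 + 1)) (count.getD w 0 + 1) w ws
    else pvCountF (count.insert w (count.getD w 0 + 1)) mf mc ws

-- A's counting loop with the ban check
def pvCount (bset : PySem.Set String) : PySem.Dict String Int → Int → String → List String → String
  | _, _, mc, [] => mc
  | count, mf, mc, w :: ws =>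
    if bset.contains w then pvCount bset count mf mc ws
    else
      if count.getD w 0 + 1 > mf then pvCount bset (count.insert w (count.getD w 0 + 1)) (count.getD w 0 + 1) w ws
      else pvCount bset (count.insert w (count.getD w 0 + 1)) mf mc ws

-- maximum word frequency of a list (0 when empty)
def pvM (p : List String) : Int :=
  ((PySem.Set.ofList p).map (fun k => (p.count k : Int))).foldl max 0

theorem pvLoopA (bset : PySem.Set String) :
    ∀ n (cs : List Char), cs.length ≤ n → ∀ count mf mc,
      one_pass_loop bset count mf mc cs
        = pvCount bset count mf mc
            ((pvToksBy pvIsSign cs).map (fun w => String.ofList (w.map PySem.Chars.lowerChar))) := by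
  intro n
  induction n with
  | zero =>
    intro cs hlen count mf mc
    have : cs = [] := by cases cs <;> simp_all
    subst this
    simp [one_pass_loop, pvToksBy, pvCount]
  | succ n ih =>
    intro cs hlen count mf mc
    match cs with
    | [] => simp [one_pass_loop, pvToksBy, pvCount]
    | c :: cs' =>
      by_cases hs : pvIsSign c
      · have hstep : one_pass_loop bset count mf mc (c :: cs')
            = one_pass_loop bset count mf mc cs' := by
          rw [one_pass_loop]
          rw [List.dropWhile_cons_of_pos hs]
          cases cs' with
          | nil => simp [one_pass_loop]
          | cons d ds =>
            rw [one_pass_loop]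
        rw [hstep, pvToksBy, if_pos hs]
        exact ih cs' (by simpa using Nat.lt_succ_iff.mp (Nat.lt_of_lt_of_le (by simp) hlen)) count mf mc
      · rw [one_pass_loop, pvToksBy, if_neg hs]
        rw [List.dropWhile_cons_of_neg hs]
        have htw : List.takeWhile (fun x => !pvIsSign x) (c :: cs') = c :: List.takeWhile (fun x => !pvIsSign x) cs' :=
          List.takeWhile_cons_of_pos (by simp [hs])
        have hne : ¬ ((List.takeWhile (fun x => !pvIsSign x) (c :: cs')).map PySem.Chars.lowerChar).isEmpty = true := by
          simp [htw]
        rw [if_neg hne]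
        have hrec : (List.dropWhile (fun x => !pvIsSign x) (c :: cs')).length ≤ n := by
          have h1 : (List.dropWhile (fun x => !pvIsSign x) (c :: cs')).length < (c :: cs').length :=
            pvDropWhileLt _ _ (by simp [htw])
          omega
        rw [List.map_cons, pvCount]
        set w := String.ofList ((List.takeWhile (fun x => !pvIsSign x) (c :: cs')).map PySem.Chars.lowerChar) with hw
        by_cases hb : bset.contains w
        · rw [if_pos hb, if_pos hb]
          exact ih _ hrec count mf mc
        · rw [if_neg hb, if_neg hb]
          have hgd : (count.insert w (count.getD w 0 + 1)).getD w 0 = count.getD w 0 + 1 := by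
            simp
          simp only [hgd]
          by_cases hcmp : count.getD w 0 + 1 > mf
          · rw [if_pos hcmp, if_pos hcmp]
            exact ih _ hrec _ _ _
          · rw [if_neg hcmp, if_neg hcmp]
            exact ih _ hrec _ _ _

theorem pvCount_filter (bset : PySem.Set String) :
    ∀ (ws : List String) count mf mc,
      pvCount bset count mf mc ws = pvCountF count mf mc (ws.filter (fun w => !bset.contains w)) := by
  intro ws
  induction ws with
  | nil => intro count mf mc; simp [pvCount, pvCountF]
  | cons w ws ih =>
    intro count mf mc
    rw [pvCount, List.filter_cons]
    by_cases hb : bset.contains w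
    · simp only [hb, if_pos, Bool.not_true, Bool.false_eq_true, if_neg, not_false_iff]
      exact ih count mf mc
    · simp only [hb, Bool.false_eq_true, if_neg, not_false_iff, Bool.not_false, if_pos]
      rw [pvCountF]
      by_cases hcmp : count.getD w 0 + 1 > mf
      · rw [if_pos hcmp, if_pos hcmp]; exact ih _ _ _
      · rw [if_neg hcmp, if_neg hcmp]; exact ih _ _ _

theorem charEqOfToNat (c : Char) (n : Char) (h : c.toNat = n.toNat) : c = n :=
  Char.ext (UInt32.toNat_inj.mp h)

theorem pvIsSign_iff (c : Char) : pvIsSign c = true ↔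
    (c.toNat = 32 ∨ c.toNat = 33 ∨ c.toNat = 63 ∨ c.toNat = 39 ∨ c.toNat = 44 ∨ c.toNat = 59 ∨ c.toNat = 58 ∨ c.toNat = 46) := by
  simp only [pvIsSign, pvSigns, List.contains_cons, List.contains_nil, Bool.or_eq_true,
    beq_iff_eq, Bool.false_eq_true, or_false]
  constructor
  · rintro (rfl|rfl|rfl|rfl|rfl|rfl|rfl|rfl) <;> decide
  · rintro (h|h|h|h|h|h|h|h)
    · exact Or.inl (charEqOfToNat c ' ' (by rw [h]; rfl))
    · exact Or.inr (Or.inl (charEqOfToNat c '!' (by rw [h]; rfl)))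
    · exact Or.inr (Or.inr (Or.inl (charEqOfToNat c '?' (by rw [h]; rfl))))
    · exact Or.inr (Or.inr (Or.inr (Or.inl (charEqOfToNat c '\'' (by rw [h]; rfl)))))
    · exact Or.inr (Or.inr (Or.inr (Or.inr (Or.inl (charEqOfToNat c ',' (by rw [h]; rfl))))))
    · exact Or.inr (Or.inr (Or.inr (Or.inr (Or.inr (Or.inl (charEqOfToNat c ';' (by rw [h]; rfl)))))))
    · exact Or.inr (Or.inr (Or.inr (Or.inr (Or.inr (Or.inr (Or.inl (charEqOfToNat c ':' (by rw [h]; rfl))))))))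
    · exact Or.inr (Or.inr (Or.inr (Or.inr (Or.inr (Or.inr (Or.inr (charEqOfToNat c '.' (by rw [h]; rfl))))))))

theorem pvIsSign_lowerChar (c : Char) : pvIsSign (PySem.Chars.lowerChar c) = pvIsSign c := by
  unfold PySem.Chars.lowerChar PySem.Chars.isupper
  by_cases h : 'A' ≤ c ∧ c ≤ 'Z'
  · have h65 : 65 ≤ c.toNat := h.1
    have h90 : c.toNat ≤ 90 := h.2
    have ht : (Char.ofNat (c.toNat + 32)).toNat = c.toNat + 32 := by
      rw [Char.toNat_ofNat]
      have hv : (c.toNat + 32).isValidChar := by left; omega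
      simp [hv]
    rw [if_pos (by simp [h.1, h.2])]
    have e1 : pvIsSign (Char.ofNat (c.toNat + 32)) = false := by
      rw [Bool.eq_false_iff]; intro hh; rw [pvIsSign_iff, ht] at hh; omega
    have e2 : pvIsSign c = false := by
      rw [Bool.eq_false_iff]; intro hh; rw [pvIsSign_iff] at hh; omega
    rw [e1, e2]
  · rw [if_neg (by simpa [Bool.and_eq_true, decide_eq_true_eq] using h)]

-- pvTrans sends exactly the sign characters to ' ' and fixes everything else
theorem pvTrans_space_iff (c : Char) : (pvTrans c = ' ') ↔ pvIsSign c = true := by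
  unfold pvTrans
  by_cases h : pvPunct.contains c
  · simp only [h, if_pos]
    have hs : pvIsSign c = true := by
      simp only [pvPunct, List.contains_cons, List.contains_nil, Bool.or_eq_true, beq_iff_eq, Bool.false_eq_true, or_false] at h
      rcases h with rfl|rfl|rfl|rfl|rfl|rfl|rfl <;> decide
    simp [hs]
  · simp only [h, Bool.false_eq_true, if_neg, not_false_iff]
    constructor
    · intro hc; subst hc; decide
    · intro hs
      simp only [pvIsSign, pvSigns, List.contains_cons, List.contains_nil, Bool.or_eq_true, beq_iff_eq, Bool.false_eq_true, or_false] at hs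
      simp only [pvPunct, List.contains_cons, List.contains_nil, Bool.or_eq_true, beq_iff_eq, Bool.false_eq_true, or_false] at h
      rcases hs with rfl|rfl|rfl|rfl|rfl|rfl|rfl|rfl
      · rfl
      all_goals exact absurd (by tauto) h

theorem pvTrans_of_not_sign (c : Char) (h : ¬ pvIsSign c = true) : pvTrans c = c := by
  unfold pvTrans
  rw [if_neg]
  intro hp
  apply h
  simp only [pvIsSign, pvSigns, List.contains_cons, Bool.or_eq_true]
  simp only [pvPunct, List.contains_cons, List.contains_nil, Bool.or_eq_true] at hp
  tauto

-- splitOn [' '] is pvSplit1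
theorem pvSplitOn_go :
    ∀ (fuel : Nat) (l cur : List Char) (acc : List (List Char)), l.length < fuel →
      PySem.Chars.splitOn.go [' '] fuel l cur acc = acc.reverse ++ pvSplit1 cur.reverse l := by
  intro fuel
  induction fuel with
  | zero => intro l cur acc h; omega
  | succ fuel ih =>
    intro l cur acc h
    cases l with
    | nil =>
      rw [PySem.Chars.splitOn.go]
      · simp [pvSplit1]
      · omega
    | cons a l =>
      rw [PySem.Chars.splitOn.go]
      by_cases ha : a = ' '
      · subst ha
        have hp : [' '].isPrefixOf (' ' :: l) = true := by simp [List.isPrefixOf]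
        rw [if_pos hp]
        have hd : List.drop [' '].length (' ' :: l) = l := by simp
        rw [hd, ih l [] (cur.reverse :: acc) (by simp at h ⊢; omega)]
        rw [pvSplit1, if_pos rfl]
        simp
      · have hp : [' '].isPrefixOf (a :: l) = false := by
          simp [List.isPrefixOf]; exact fun hh => ha hh.symm
        rw [if_neg (by simp [hp])]
        rw [ih l (a :: cur) acc (by simp at h ⊢; omega)]
        rw [pvSplit1, if_neg ha]
        simp

theorem pvSplitOn_eq (l : List Char) :
    PySem.Chars.splitOn l [' '] = pvSplit1 [] l := by
  rw [PySem.Chars.splitOn, pvSplitOn_go (l.length + 1) l [] [] (by omega)]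
  simp

-- filtering the empties out of the split gives the tokens
theorem pvSplit1_toks_aux :
    ∀ (l : List Char),
      ((pvSplit1 [] l).filter (fun t => t ≠ []) = pvToksBy (fun c => c = ' ') l)
      ∧ ∀ cur, cur ≠ [] → (pvSplit1 cur l).filter (fun t => t ≠ [])
          = (cur ++ List.takeWhile (fun x => !decide (x = ' ')) l)
            :: pvToksBy (fun c => c = ' ') (List.dropWhile (fun x => !decide (x = ' ')) l) := by
  intro l
  induction l with
  | nil =>
    constructor
    · simp [pvSplit1, pvToksBy]
    · intro cur hcur
      simp [pvSplit1, pvToksBy, hcur]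
  | cons a l ih =>
    constructor
    · rw [pvSplit1, pvToksBy]
      by_cases ha : a = ' '
      · rw [if_pos ha, if_pos (by simp [ha]), List.filter_cons]
        simpa using ih.1
      · rw [if_neg ha, if_neg (by simp [ha])]
        rw [List.nil_append, (ih.2 [a] (by simp))]
        rw [List.takeWhile_cons_of_pos (by simp [ha]), List.dropWhile_cons_of_pos (by simp [ha])]
        simp
    · intro cur hcur
      rw [pvSplit1]
      by_cases ha : a = ' '
      · rw [if_pos ha, List.filter_cons, if_pos (by simpa using hcur)]
        rw [ih.1]
        rw [List.takeWhile_cons_of_neg (by simp [ha]), List.dropWhile_cons_of_neg (by simp [ha])]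
        rw [pvToksBy, if_pos (by simp [ha])]
        simp
      · rw [if_neg ha, (ih.2 (cur ++ [a]) (by simp))]
        rw [List.takeWhile_cons_of_pos (by simp [ha]), List.dropWhile_cons_of_pos (by simp [ha])]
        simp

theorem pvSplit1_toks (l : List Char) :
    (pvSplit1 [] l).filter (fun t => t ≠ []) = pvToksBy (fun c => c = ' ') l :=
  (pvSplit1_toks_aux l).1

-- translating moves space-tokenizing to sign-tokenizing
theorem pvTrans_comp_space :
    ((fun x => !decide (x = ' ')) ∘ pvTrans) = (fun x => !pvIsSign x) := by
  funext c
  by_cases h : pvIsSign c = true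
  · simp [Function.comp, (pvTrans_space_iff _).mpr h, h]
  · have hc : pvTrans c = c := pvTrans_of_not_sign c h
    have hne : ¬ (c = ' ') := fun e => h (by subst e; decide)
    simp [Function.comp, hc, hne, h]

theorem pvToks_trans :
    ∀ n (cs : List Char), cs.length ≤ n →
      pvToksBy (fun c => c = ' ') (cs.map pvTrans) = pvToksBy pvIsSign cs := by
  intro n
  induction n with
  | zero =>
    intro cs hlen
    have : cs = [] := by cases cs <;> simp_all
    subst this; simp [pvToksBy]
  | succ n ih =>
    intro cs hlen
    match cs with
    | [] => simp [pvToksBy]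
    | c :: cs' =>
      rw [List.map_cons, pvToksBy, pvToksBy]
      have hcond : decide (pvTrans c = ' ') = pvIsSign c := by
        by_cases h : pvIsSign c = true
        · simp [(pvTrans_space_iff _).mpr h, h]
        · have hc : pvTrans c = c := pvTrans_of_not_sign c h
          have hne : ¬ (c = ' ') := fun e => h (by subst e; decide)
          simp [hc, hne, h]
      rw [hcond]
      by_cases hs : pvIsSign c
      · rw [if_pos hs, if_pos hs]
        exact ih cs' (by simpa using Nat.lt_succ_iff.mp (Nat.lt_of_lt_of_le (by simp) hlen))
      · rw [if_neg hs, if_neg hs]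
        rw [show pvTrans c :: List.map pvTrans cs' = List.map pvTrans (c :: cs') from rfl]
        rw [List.takeWhile_map, List.dropWhile_map, pvTrans_comp_space]
        have hid : List.map pvTrans (List.takeWhile (fun x => !pvIsSign x) (c :: cs'))
            = List.takeWhile (fun x => !pvIsSign x) (c :: cs') := by
          rw [List.map_congr_left (g := id), List.map_id]
          intro x hx
          exact pvTrans_of_not_sign x (by simpa using List.mem_takeWhile_imp hx)
        rw [hid]
        have hrec : (List.dropWhile (fun x => !pvIsSign x) (c :: cs')).length ≤ n := by
          have h1 : (List.dropWhile (fun x => !pvIsSign x) (c :: cs')).length < (c :: cs').length :=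
            pvDropWhileLt _ _ (by rw [List.takeWhile_cons_of_pos (by simp [hs])]; simp)
          omega
        rw [ih _ hrec]

theorem pvIsSign_comp_lowerChar :
    ((fun x => !pvIsSign x) ∘ PySem.Chars.lowerChar) = (fun x => !pvIsSign x) := by
  funext c; simp [Function.comp, pvIsSign_lowerChar]

-- tokenizing after lowering = lowering each token
theorem pvToks_lower :
    ∀ n (cs : List Char), cs.length ≤ n →
      pvToksBy pvIsSign (cs.map PySem.Chars.lowerChar) = (pvToksBy pvIsSign cs).map (List.map PySem.Chars.lowerChar) := by
  intro n
  induction n with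
  | zero =>
    intro cs hlen
    have : cs = [] := by cases cs <;> simp_all
    subst this; simp [pvToksBy]
  | succ n ih =>
    intro cs hlen
    match cs with
    | [] => simp [pvToksBy]
    | c :: cs' =>
      rw [List.map_cons, pvToksBy, pvToksBy, pvIsSign_lowerChar]
      by_cases hs : pvIsSign c
      · rw [if_pos hs, if_pos hs]
        exact ih cs' (by simpa using Nat.lt_succ_iff.mp (Nat.lt_of_lt_of_le (by simp) hlen))
      · rw [if_neg hs, if_neg hs]
        rw [show PySem.Chars.lowerChar c :: List.map PySem.Chars.lowerChar cs' = List.map PySem.Chars.lowerChar (c :: cs') from rfl]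
        rw [List.takeWhile_map, List.dropWhile_map, pvIsSign_comp_lowerChar]
        rw [List.map_cons]
        congr 1
        have hrec : (List.dropWhile (fun x => !pvIsSign x) (c :: cs')).length ≤ n := by
          have h1 : (List.dropWhile (fun x => !pvIsSign x) (c :: cs')).length < (c :: cs').length :=
            pvDropWhileLt _ _ (by simp [List.takeWhile_cons_of_pos, hs])
          omega
        exact ih _ hrec

-- facts about pvM
theorem pvM_nonneg (p : List String) : 0 ≤ pvM p :=
  (PySem.List.le_foldl_max _ 0).1

theorem pvM_count_le (p : List String) (w : String) : (p.count w : Int) ≤ pvM p := by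
  by_cases hw : w ∈ p
  · exact (PySem.List.le_foldl_max _ 0).2 _ (List.mem_map.mpr ⟨w, (PySem.Set.mem_ofList p w).mpr hw, rfl⟩)
  · rw [List.count_eq_zero_of_not_mem hw]
    simpa using pvM_nonneg p

theorem pvFoldlMax_le (l : List Int) (b b' : Int) (h0 : b ≤ b') (h : ∀ x ∈ l, x ≤ b') :
    l.foldl max b ≤ b' := by
  rcases PySem.List.foldl_max_mem l b with h1 | h1
  · rw [h1]; exact h0
  · exact h _ h1

theorem pvCount_append_singleton (p : List String) (w k : String) :
    ((p ++ [w]).count k : Int) = (p.count k : Int) + (if k = w then 1 else 0) := by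
  rw [List.count_append, List.count_singleton]
  by_cases hkw : k = w
  · subst hkw; simp
  · rw [if_neg (by simpa using Ne.symm hkw), if_neg hkw]; simp

theorem pvM_append_singleton (p : List String) (w : String) :
    pvM (p ++ [w]) = max (pvM p) ((p.count w : Int) + 1) := by
  apply le_antisymm
  · apply pvFoldlMax_le
    · exact le_max_of_le_left (pvM_nonneg p)
    · intro x hx
      rcases List.mem_map.mp hx with ⟨k, _, rfl⟩
      rw [pvCount_append_singleton]
      by_cases hkw : k = w
      · subst hkw; rw [if_pos rfl]; exact le_max_of_le_right (by exact_mod_cast le_refl _)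
      · rw [if_neg hkw, add_zero]; exact le_max_of_le_left (pvM_count_le p k)
  · apply max_le
    · apply pvFoldlMax_le _ _ _ (pvM_nonneg (p ++ [w]))
      intro x hx
      rcases List.mem_map.mp hx with ⟨k, _, rfl⟩
      calc (p.count k : Int) ≤ ((p ++ [w]).count k : Int) := by
            rw [pvCount_append_singleton]
            split_ifs <;> omega
        _ ≤ pvM (p ++ [w]) := pvM_count_le (p ++ [w]) k
    · have hw : ((p ++ [w]).count w : Int) = (p.count w : Int) + 1 := by
        rw [pvCount_append_singleton, if_pos rfl]
      rw [← hw]; exact pvM_count_le (p ++ [w]) w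

theorem pvM_mono : ∀ (ws q : List String), pvM q ≤ pvM (q ++ ws) := by
  intro ws
  induction ws with
  | nil => intro q; simp
  | cons w ws ih =>
    intro q
    calc pvM q ≤ pvM (q ++ [w]) := by rw [pvM_append_singleton]; exact le_max_left _ _
      _ ≤ pvM ((q ++ [w]) ++ ws) := ih (q ++ [w])
      _ = pvM (q ++ w :: ws) := by rw [List.append_cons q w ws]

theorem pvCounter_step (p : List String) (w : String) :
    (PySem.Dict.counter p).insert w (((p.count w : Nat) : Int) + 1) = PySem.Dict.counter (p ++ [w]) := by
  have h := PySem.Dict.getD_counter p w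
  rw [← h]
  simp only [← PySem.Dict.foldl_insert_getD_add_one_eq_counter, List.foldl_append,
    List.foldl_cons, List.foldl_nil]

-- the core: A's counting loop = first word to reach the global max
theorem pvCore :
    ∀ (ws p : List String) (mc : String),
      pvCountF (PySem.Dict.counter p) (pvM p) mc ws
        = if pvM (p ++ ws) > pvM p then pvScanFirst (pvM (p ++ ws)) (PySem.Dict.counter p) ws else mc := by
  intro ws
  induction ws with
  | nil =>
    intro p mc
    simp [pvCountF]
  | cons w ws ih =>
    intro p mc
    rw [pvCountF, PySem.Dict.getD_counter, pvCounter_step]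
    have hM1 := pvM_append_singleton p w
    have hMt : p ++ w :: ws = (p ++ [w]) ++ ws := List.append_cons p w ws
    have hmono := pvM_mono ws (p ++ [w])
    by_cases hc : ((p.count w : Nat) : Int) + 1 > pvM p
    · rw [if_pos hc]
      have hpw : pvM (p ++ [w]) = ((p.count w : Nat) : Int) + 1 := by
        rw [hM1]; exact max_eq_right (le_of_lt hc)
      have hIH := ih (p ++ [w]) w
      rw [hpw] at hIH hmono
      rw [hIH, hMt]
      have hgt : pvM p < pvM ((p ++ [w]) ++ ws) := lt_of_lt_of_le hc hmono
      rw [if_pos hgt]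
      rw [pvScanFirst]
      simp only [PySem.Dict.getD_counter, pvCounter_step]
      by_cases he : ((p.count w : Nat) : Int) + 1 = pvM ((p ++ [w]) ++ ws)
      · rw [if_pos he, if_neg (by rw [he]; exact lt_irrefl _)]
      · rw [if_neg he, if_pos (lt_of_le_of_ne hmono he)]
    · rw [if_neg hc]
      have hpw : pvM (p ++ [w]) = pvM p := by
        rw [hM1]; exact max_eq_left (not_lt.mp hc)
      have hIH := ih (p ++ [w]) mc
      rw [hpw] at hIH hmono
      rw [hIH, hMt]
      by_cases hgt : pvM ((p ++ [w]) ++ ws) > pvM p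
      · rw [if_pos hgt, if_pos hgt]
        rw [pvScanFirst]
        simp only [PySem.Dict.getD_counter, pvCounter_step]
        rw [if_neg (by intro he; rw [he] at hc; exact hc hgt)]
      · rw [if_neg hgt, if_neg hgt]

-- B's m is pvM words
theorem pvMaxD_eq (ws : List String) :
    PySem.List.maxD (ws.foldl (fun (d : PySem.Dict String Int) w => d.insert w (d.getD w 0 + 1)) PySem.Dict.empty).values (fun x => x) 0 = pvM ws := by
  rw [PySem.Dict.foldl_insert_getD_add_one_eq_counter]
  have hv : (PySem.Dict.counter ws).values = (PySem.Set.ofList ws).map (fun k => (ws.count k : Int)) := by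
    show ((PySem.Dict.counter ws).items).map (fun x => x.2) = _
    rw [PySem.Dict.items_counter, List.map_map]
    rfl
  unfold PySem.List.maxD
  rw [hv]
  rcases hL : (PySem.Set.ofList ws).map (fun k => (ws.count k : Int)) with _ | ⟨v, t⟩
  · rw [pvM, hL]
    rfl
  · rw [PySem.List.max?_id_cons, Option.getD_some, pvM, hL, List.foldl_cons]
    have hv0 : 0 ≤ v := by
      have hm : v ∈ (PySem.Set.ofList ws).map (fun k => (ws.count k : Int)) := by
        rw [hL]; exact List.mem_cons_self
      rcases List.mem_map.mp hm with ⟨k, _, rfl⟩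
      exact Int.natCast_nonneg _
    rw [max_eq_right hv0]

theorem pvMk_beq_empty (t : List Char) : (String.ofList t == "") = decide (t = []) := by
  rw [Bool.eq_iff_iff]
  simp only [beq_iff_eq, decide_eq_true_eq]
  constructor
  · intro h; have h2 := congrArg String.toList h; simpa using h2
  · intro h; subst h; rfl

-- B's word list is A's (lowered, banned-filtered) token list
theorem pvWords_eq (bset : PySem.Set String) (cs : List Char) :
    ((pvSplit1 [] (List.map pvTrans (PySem.Chars.lower cs))).map String.ofList).filter
        (fun w => !(w == "") && !bset.contains w)
      = ((pvToksBy pvIsSign cs).map (fun w => String.ofList (List.map PySem.Chars.lowerChar w))).filter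
        (fun w => !bset.contains w) := by
  have htoks : pvToksBy (fun c => c = ' ') (List.map pvTrans (PySem.Chars.lower cs))
      = (pvToksBy pvIsSign cs).map (List.map PySem.Chars.lowerChar) := by
    rw [show PySem.Chars.lower cs = cs.map PySem.Chars.lowerChar from rfl]
    rw [pvToks_trans (cs.map PySem.Chars.lowerChar).length _ (le_refl _)]
    exact pvToks_lower cs.length cs (le_refl _)
  rw [List.filter_map]
  have hff : List.filter ((fun w => !(w == "") && !bset.contains w) ∘ String.ofList)
        (pvSplit1 [] (List.map pvTrans (PySem.Chars.lower cs)))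
      = List.filter ((fun w => !bset.contains w) ∘ String.ofList)
          (List.filter (fun t => t ≠ []) (pvSplit1 [] (List.map pvTrans (PySem.Chars.lower cs)))) := by
    rw [List.filter_filter]
    apply List.filter_congr
    intro t _
    simp only [Function.comp, pvMk_beq_empty]
    by_cases ht : t = [] <;> simp [ht]
  rw [hff, pvSplit1_toks, htoks]
  rw [List.filter_map, List.filter_map, List.map_map]
  rfl

-- the two counting strategies agree from the empty state
theorem pvFinal (ws : List String) :
    pvCountF PySem.Dict.empty 0 "" ws = pvScanFirst (pvM ws) PySem.Dict.empty ws := by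
  cases ws with
  | nil => rfl
  | cons w t =>
    have hcore := pvCore (w :: t) [] ""
    rw [List.nil_append] at hcore
    have hc0 : PySem.Dict.counter ([] : List String) = PySem.Dict.empty := rfl
    have hm0 : pvM ([] : List String) = 0 := rfl
    rw [hc0, hm0] at hcore
    have hpos : 0 < pvM (w :: t) := by
      have h2 := pvM_count_le (w :: t) w
      have h3 : 0 < (w :: t).count w := by rw [List.count_cons_self]; omega
      omega
    rw [hcore, if_pos hpos]

-- ===== VERDICT (by name: the statement is the Claim_ definition above) =====
theorem one_pass_spec : Claim_equal_one_pass := by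
  intro paragraph banned _
  unfold Spec_one_pass one_pass
  rw [pvLoopA (PySem.Set.ofList banned) paragraph.toList.length paragraph.toList (le_refl _),
    pvCount_filter]
  simp only [one_pass_alt]
  rw [PySem.Str.toList_lower, pvSplitOn_eq, pvWords_eq, pvMaxD_eq, pvFinal]
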